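-- pv_equiv track=rewrite | github.com/hhssmm95/ProblemSolving | PythonPracitce/TCT/TCT_DP_soldier_positioning.py | solution
-- ===== SOURCE A (Python) =====
-- def solution(n, soldiers):
--     dp = [1] * (n+1)
--
--     soldiers.reverse()
--
--     for i in range(1,n):
--         for j in range(0, i):
--             if soldiers[j] < soldiers[i]:
--                 dp[i] = max(dp[i], dp[j] +1)
--     return n-max(dp)
-- ===== SOURCE B (Python) =====
-- # Patience-sorting LIS (bisect) instead of the O(n^2) DP; return value only:
-- # unlike A, B does not reverse `soldiers` in place.
-- import bisect
--
-- def solution(n, soldiers):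
--     tails = []
--     for x in soldiers[::-1][:n]:
--         k = bisect.bisect_left(tails, x)
--         if k == len(tails):
--             tails.append(x)
--         else:
--             tails[k] = x
--     return n - len(tails)
-- ===== Notes on version B (the rewrite author's own statement) =====
-- stated objective: faster
-- what changed: Replaced the O(n^2) all-pairs LIS dynamic program with patience sorting: one pass over the reversed soldiers keeping a sorted tails array updated by binary search (bisect_left), answer n - len(tails).
-- intended difference: For n = 0 A returns -1 because max is taken over the dp array of length n+1 whose phantom extra entry is 1, while B returns 0, the intended number of soldiers to remove from an empty line. — e.g. on solution(0, []): A returns -1, B returns 0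
-- outside the precondition, e.g. on solution(1, []): A returns 0, B returns 1
import Mathlib
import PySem

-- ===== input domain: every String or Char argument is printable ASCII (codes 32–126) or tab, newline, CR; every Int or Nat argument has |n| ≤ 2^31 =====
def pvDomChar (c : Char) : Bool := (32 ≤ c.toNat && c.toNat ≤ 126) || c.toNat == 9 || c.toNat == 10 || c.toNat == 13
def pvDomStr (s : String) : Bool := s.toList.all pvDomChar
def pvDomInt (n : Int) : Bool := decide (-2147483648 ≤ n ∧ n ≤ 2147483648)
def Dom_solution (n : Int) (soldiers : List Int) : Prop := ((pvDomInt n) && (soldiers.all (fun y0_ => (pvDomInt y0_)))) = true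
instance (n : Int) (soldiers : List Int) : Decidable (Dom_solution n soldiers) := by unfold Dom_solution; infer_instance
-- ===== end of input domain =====

-- B replaces A's O(n^2) pairwise LIS dynamic program by patience sorting with binary
-- search (faster); return-value equivalence only: A reverses `soldiers` in place, B does not.

-- ===== PORT A =====
def solution (n : Int) (soldiers : List Int) : Int :=
  let rev := soldiers.reverse
  let dp0 : List Int := List.replicate (n + 1).toNat 1
  let dp := (PySem.List.pyRange 1 n 1).foldl (fun dp i =>
      (PySem.List.pyRange 0 i 1).foldl (fun dp j =>
        if PySem.List.pyGetD rev j 0 < PySem.List.pyGetD rev i 0 then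
          PySem.List.pySetD dp i (max (PySem.List.pyGetD dp i 0) (PySem.List.pyGetD dp j 0 + 1))
        else dp) dp) dp0
  n - ((PySem.List.max? dp (fun y => y)).getD 0)

-- ===== PORT B =====
-- bisect.bisect_left on the sorted list `tails` (exact there: first index whose entry is ≥ x)
def bisectLeft (tails : List Int) (x : Int) : Nat :=
  (tails.takeWhile (fun t => t < x)).length

def tailsStep (tails : List Int) (x : Int) : List Int :=
  let k := bisectLeft tails x
  if k = tails.length then tails ++ [x] else tails.set k x

def solution_alt (n : Int) (soldiers : List Int) : Int :=
  let a := PySem.List.slice soldiers.reverse none (some n)   -- soldiers[::-1][:n]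
  n - ((a.foldl tailsStep []).length : Int)

-- ===== PRECONDITION & SPEC =====
-- Pre_ excludes n < 0 (A raises ValueError: max of empty dp) and n > len(soldiers), where A
-- raises IndexError for n ≥ 2 and, for n = 1 with an empty list, returns a value
-- computed without looking at the soldiers at all.
def Pre_solution (n : Int) (soldiers : List Int) : Prop := 0 ≤ n ∧ n ≤ soldiers.length
instance (n : Int) (soldiers : List Int) : Decidable (Pre_solution n soldiers) := by unfold Pre_solution; infer_instance
def pvWitness_solution : Int × List Int := (3, [1, 3, 2])

-- For n = 0 A returns -1 (max is taken over the dp array of length n+1 whose phantom extra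
-- entry is 1), while B returns 0, the intended number of soldiers to remove from an empty line.
def D_solution (n : Int) (soldiers : List Int) : Prop := n = 0
instance (n : Int) (soldiers : List Int) : Decidable (D_solution n soldiers) := by unfold D_solution; infer_instance

def Spec_solution (n : Int) (soldiers : List Int) (out : Int) : Prop := ¬ D_solution n soldiers → out = solution_alt n soldiers
instance (n : Int) (soldiers : List Int) (out : Int) : Decidable (Spec_solution n soldiers out) := by unfold Spec_solution; infer_instance

def pvDiffWitness_solution : Int × List Int := (0, [])
def pvDiffWitnessOut_solution : Int × Int := (-1, 0)

-- ===== CLAIM (what is proved, stated in full; the proofs are below) =====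
def Claim_unchanged_solution : Prop := ∀ (n : Int) (soldiers : List Int), Dom_solution n soldiers → Pre_solution n soldiers → Spec_solution n soldiers (solution n soldiers)
def Claim_changed_solution : Prop := Dom_solution (pvDiffWitness_solution.1) (pvDiffWitness_solution.2) ∧ Pre_solution (pvDiffWitness_solution.1) (pvDiffWitness_solution.2) ∧ D_solution (pvDiffWitness_solution.1) (pvDiffWitness_solution.2) ∧ solution (pvDiffWitness_solution.1) (pvDiffWitness_solution.2) = pvDiffWitnessOut_solution.1 ∧ solution_alt (pvDiffWitness_solution.1) (pvDiffWitness_solution.2) = pvDiffWitnessOut_solution.2 ∧ pvDiffWitnessOut_solution.1 ≠ pvDiffWitnessOut_solution.2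
def Claim_exact_solution : Prop := ∀ (n : Int) (soldiers : List Int), Dom_solution n soldiers → Pre_solution n soldiers → D_solution n soldiers → solution n soldiers ≠ solution_alt n soldiers

-- ===== LEMMAS AND PROOFS =====

-- The common model: process values left to right, pairing each with the length of the
-- longest strictly increasing subsequence ending at it.
def newd (ps : List (Int × Int)) (x : Int) : Int :=
  ((ps.filter (fun p => p.1 < x)).map Prod.snd).foldl max 0 + 1

def psStep (ps : List (Int × Int)) (x : Int) : List (Int × Int) := ps ++ [(x, newd ps x)]

def psOf (l : List Int) : List (Int × Int) := l.foldl psStep []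

-- minimal value carrying a dp-length ≥ k+1 (the invariant value of tails[k])
def mval (ps : List (Int × Int)) (k : Nat) : Option Int :=
  ((ps.filter (fun p => (k : Int) + 1 ≤ p.2)).map Prod.fst).min?

def TInv (ps : List (Int × Int)) (tails : List Int) : Prop := ∀ k : Nat, tails[k]? = mval ps k

theorem psOf_append (l : List Int) (x : Int) : psOf (l ++ [x]) = psStep (psOf l) x := by
  simp [psOf]

theorem psOf_fst (l : List Int) : (psOf l).map Prod.fst = l := by
  induction l using List.reverseRecOn with
  | nil => simp [psOf]
  | append_singleton l x ih => rw [psOf_append]; simp [psStep, ih]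

theorem foldl_max_shift_if (x : Int) (ps : List (Int × Int)) (c : Int) :
    ps.foldl (fun acc p => if p.1 < x then max acc (p.2 + 1) else acc) (c + 1)
      = ps.foldl (fun acc p => if p.1 < x then max acc p.2 else acc) c + 1 := by
  induction ps generalizing c with
  | nil => rfl
  | cons p t ih =>
      simp only [List.foldl_cons]
      by_cases h : p.1 < x
      · simp only [if_pos h]
        have : max (c + 1) (p.2 + 1) = max c p.2 + 1 := by omega
        rw [this, ih]
      · simp only [if_neg h]; exact ih c

theorem newd_eval (ps : List (Int × Int)) (x : Int) :
    ps.foldl (fun acc p => if p.1 < x then max acc (p.2 + 1) else acc) 1 = newd ps x := by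
  rw [newd, List.foldl_map, List.foldl_filter]
  simp only [decide_eq_true_eq]
  have h := foldl_max_shift_if x ps 0
  norm_num at h
  exact h
theorem B_eval (n : Int) (soldiers : List Int) (h : 0 ≤ n) :
    solution_alt n soldiers
      = n - (((soldiers.reverse.take n.toNat).foldl tailsStep []).length : Int) := by
  unfold solution_alt
  rw [PySem.List.slice_to _ h]

theorem min?_append_singleton (l : List Int) (a : Int) :
    (l ++ [a]).min? = some ((l.min?).elim a (fun b => min b a)) := by
  induction l with
  | nil => simp [List.min?_cons]
  | cons h t ih =>
      simp only [List.cons_append, List.min?_cons, ih]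
      cases htm : t.min? with
      | none => simp
      | some b => simp [min_assoc]

theorem bisect_facts (x : Int) (tails : List Int) :
    bisectLeft tails x ≤ tails.length ∧
      (∀ k, k < bisectLeft tails x → ∃ t, tails[k]? = some t ∧ t < x) ∧
      (∀ t, tails[bisectLeft tails x]? = some t → x ≤ t) := by
  induction tails with
  | nil => simp [bisectLeft]
  | cons h tl ih =>
      have hcons : bisectLeft (h :: tl) x
          = if h < x then bisectLeft tl x + 1 else 0 := by
        simp only [bisectLeft, List.takeWhile_cons]
        split_ifs with hh <;> simp_all
      by_cases hh : h < x
      · rw [hcons, if_pos hh]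
        refine ⟨by simpa using ih.1, ?_, ?_⟩
        · intro k hk
          cases k with
          | zero => exact ⟨h, by simp, hh⟩
          | succ k => simpa using ih.2.1 k (by omega)
        · intro t ht
          simp only [List.getElem?_cons_succ] at ht
          exact ih.2.2 t ht
      · rw [hcons, if_neg hh]
        refine ⟨by omega, fun k hk => absurd hk (by omega), ?_⟩
        intro t ht
        simp only [List.getElem?_cons_zero, Option.some.injEq] at ht
        omega

theorem mval_psStep (ps : List (Int × Int)) (x d : Int) (k : Nat) :
    mval (ps ++ [(x, d)]) k
      = if (k : Int) + 1 ≤ d then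
          some ((mval ps k).elim x (fun t => min t x))
        else mval ps k := by
  unfold mval
  rw [List.filter_append]
  by_cases hk : (k : Int) + 1 ≤ d
  · rw [if_pos hk]
    simp only [List.filter_cons, List.filter_nil]
    rw [if_pos (by simpa using hk)]
    simp only [List.map_append, List.map_cons, List.map_nil]
    exact min?_append_singleton _ x
  · rw [if_neg hk]
    simp only [List.filter_cons, List.filter_nil]
    rw [if_neg (by simpa using hk)]
    simp
-- mval is characterized by membership
theorem mval_eq_some_iff (ps : List (Int × Int)) (k : Nat) (t : Int) :
    mval ps k = some t ↔
      ((∃ p ∈ ps, (k : Int) + 1 ≤ p.2 ∧ p.1 = t) ∧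
        ∀ p ∈ ps, (k : Int) + 1 ≤ p.2 → t ≤ p.1) := by
  unfold mval
  rw [List.min?_eq_some_iff]
  simp only [List.mem_map, List.mem_filter, decide_eq_true_eq]
  constructor
  · rintro ⟨⟨p, ⟨hp, hd⟩, hfst⟩, hmin⟩
    exact ⟨⟨p, hp, hd, hfst⟩, fun q hq hqd => hmin q.1 ⟨q, ⟨hq, hqd⟩, rfl⟩⟩
  · rintro ⟨⟨p, hp, hd, hfst⟩, hmin⟩
    exact ⟨⟨p, ⟨hp, hd⟩, hfst⟩, by rintro b ⟨q, ⟨hq, hqd⟩, rfl⟩; exact hmin q hq hqd⟩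

theorem mval_eq_none_iff (ps : List (Int × Int)) (k : Nat) :
    mval ps k = none ↔ ∀ p ∈ ps, p.2 ≤ (k : Int) := by
  unfold mval
  rw [List.min?_eq_none_iff]
  simp only [List.map_eq_nil_iff, List.filter_eq_nil_iff, decide_eq_true_eq]
  constructor
  · intro h p hp; have := h p hp; omega
  · intro h p hp; have := h p hp; omega

-- the new dp value is exactly bisect position + 1
theorem newd_bisect (ps : List (Int × Int)) (tails : List Int) (x : Int)
    (h : TInv ps tails) : newd ps x = (bisectLeft tails x : Int) + 1 := by
  have hM := PySem.List.le_foldl_max ((ps.filter (fun p => p.1 < x)).map Prod.snd) 0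
  set M := ((ps.filter (fun p => p.1 < x)).map Prod.snd).foldl max 0 with hMdef
  have hnewd : newd ps x = M + 1 := rfl
  set k0 := bisectLeft tails x with hk0
  have hbf := bisect_facts x tails
  -- upper bound: M ≤ k0
  have hub : M ≤ (k0 : Int) := by
    by_contra hcon
    push_neg at hcon
    have hMpos : 0 < M := by omega
    rcases PySem.List.foldl_max_mem ((ps.filter (fun p => p.1 < x)).map Prod.snd) 0 with h0 | hmem
    · omega
    · simp only [List.mem_map, List.mem_filter, decide_eq_true_eq] at hmem
      rcases hmem with ⟨p, ⟨hp, hpx⟩, hpM⟩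
      -- the mval-filter at k0 is nonempty, so tails[k0] exists and is < x
      have hne : mval ps k0 ≠ none := by
        simp only [Ne, mval_eq_none_iff]
        push_neg
        exact ⟨p, hp, by omega⟩
      cases hmv : mval ps k0 with
      | none => exact hne hmv
      | some t =>
          have := (mval_eq_some_iff ps k0 t).1 hmv
          have htx : t < x := lt_of_le_of_lt (this.2 p hp (by omega)) hpx
          have := hbf.2.2 t (by rw [h k0]; exact hmv)
          omega
  -- lower bound: k0 ≤ M
  have hlb : (k0 : Int) ≤ M := by
    cases hk0n : k0 with
    | zero => simpa using hM.1
    | succ m =>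
        have hm : m < k0 := by omega
        rcases hbf.2.1 m hm with ⟨t, htg, htx⟩
        have hmv : mval ps m = some t := by rw [← h m]; exact htg
        rcases (mval_eq_some_iff ps m t).1 hmv with ⟨⟨p, hp, hpd, hpt⟩, _⟩
        have hmemM : p.2 ≤ M := by
          apply hM.2
          simp only [List.mem_map, List.mem_filter, decide_eq_true_eq]
          exact ⟨p, ⟨hp, by omega⟩, rfl⟩
        omega
  omega

theorem step_inv (ps : List (Int × Int)) (tails : List Int) (x : Int) (h : TInv ps tails) :
    TInv (psStep ps x) (tailsStep tails x) := by
  have hbf := bisect_facts x tails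
  set k0 := bisectLeft tails x with hk0
  have hd : newd ps x = (k0 : Int) + 1 := newd_bisect ps tails x h
  intro k
  unfold psStep
  rw [mval_psStep, hd]
  unfold tailsStep
  rw [← hk0]
  by_cases hcase : k0 = tails.length
  · -- append
    rw [if_pos hcase]
    rcases lt_trichotomy k k0 with hk | hk | hk
    · rw [if_pos (by omega)]
      rcases hbf.2.1 k hk with ⟨t, htg, htx⟩
      have : (tails ++ [x])[k]? = some t := by
        rw [List.getElem?_append_left (by omega)]; exact htg
      rw [this, ← h k, htg]
      simp [min_eq_left (le_of_lt htx)]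
    · rw [if_pos (by omega)]
      have hnone : tails[k]? = none := List.getElem?_eq_none (by omega)
      have hidx : k - tails.length = 0 := by omega
      have hx : (tails ++ [x])[k]? = some x := by
        rw [List.getElem?_append_right (by omega), hidx]
        rfl
      rw [hx, ← h k, hnone]
      rfl
    · rw [if_neg (by omega)]
      have h1 : (tails ++ [x])[k]? = none := by
        apply List.getElem?_eq_none
        simp only [List.length_append, List.length_cons, List.length_nil]
        omega
      have h2 : tails[k]? = none := List.getElem?_eq_none (by omega)
      rw [h1, ← h k, h2]
  · -- set inside
    have hlt : k0 < tails.length := lt_of_le_of_ne hbf.1 hcase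
    rw [if_neg hcase]
    rcases lt_trichotomy k k0 with hk | hk | hk
    · rw [if_pos (by omega)]
      rcases hbf.2.1 k hk with ⟨t, htg, htx⟩
      have : (tails.set k0 x)[k]? = some t := by
        rw [List.getElem?_set_ne (by omega)]; exact htg
      rw [this, ← h k, htg]
      simp [min_eq_left (le_of_lt htx)]
    · rw [if_pos (by omega)]
      have hset : (tails.set k0 x)[k]? = some x := by
        rw [hk]
        exact List.getElem?_set_self hlt
      cases htg : tails[k0]? with
      | none =>
          rw [List.getElem?_eq_none_iff] at htg
          omega
      | some t =>
          have hxt : x ≤ t := hbf.2.2 t htg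
          rw [hset, ← h k, hk, htg]
          simp [min_eq_right hxt]
    · rw [if_neg (by omega)]
      have : (tails.set k0 x)[k]? = tails[k]? := List.getElem?_set_ne (by omega)
      rw [this, ← h k]

theorem inv_psOf (l : List Int) : TInv (psOf l) (l.foldl tailsStep []) := by
  induction l using List.reverseRecOn with
  | nil =>
      intro k
      simp [psOf, mval]
  | append_singleton l x ih =>
      rw [psOf_append, List.foldl_append]
      exact step_inv _ _ x ih

theorem length_eq_maxd (ps : List (Int × Int)) (tails : List Int) (h : TInv ps tails) :
    (tails.length : Int) = (ps.map Prod.snd).foldl max 0 := by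
  have hM := PySem.List.le_foldl_max (ps.map Prod.snd) 0
  set M := (ps.map Prod.snd).foldl max 0 with hMdef
  have hM0 : 0 ≤ M := hM.1
  -- tails[M.toNat]? = none, so length ≤ M.toNat
  have hub : tails.length ≤ M.toNat := by
    have : mval ps M.toNat = none := by
      rw [mval_eq_none_iff]
      intro p hp
      have : p.2 ≤ M := hM.2 p.2 (List.mem_map.2 ⟨p, hp, rfl⟩)
      omega
    have hge := h M.toNat
    rw [this] at hge
    rw [List.getElem?_eq_none_iff] at hge
    omega
  by_cases hMz : M ≤ 0
  · have : M = 0 := le_antisymm hMz hM0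
    omega
  · push_neg at hMz
    rcases PySem.List.foldl_max_mem (ps.map Prod.snd) 0 with h0 | hmem
    · omega
    · rcases List.mem_map.1 hmem with ⟨p, hp, hpM⟩
      have hsome : mval ps (M.toNat - 1) ≠ none := by
        simp only [Ne, mval_eq_none_iff]
        push_neg
        exact ⟨p, hp, by omega⟩
      have hlen : M.toNat - 1 < tails.length := by
        by_contra hcon
        exact hsome (by rw [← h (M.toNat - 1)]; exact List.getElem?_eq_none (by omega))
      omega
def innerF (rev : List Int) (i : Int) : List Int → Int → List Int :=
  fun dp j =>
    if PySem.List.pyGetD rev j 0 < PySem.List.pyGetD rev i 0 then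
      PySem.List.pySetD dp i (max (PySem.List.pyGetD dp i 0) (PySem.List.pyGetD dp j 0 + 1))
    else dp

def outerF (rev : List Int) : List Int → Int → List Int :=
  fun dp i => (PySem.List.pyRange 0 i 1).foldl (innerF rev i) dp

theorem inner_eval (rev : List Int) (I : Nat) (dp : List Int) (hI : I < dp.length) :
    ∀ (js : List Int) (acc : Int), (∀ j ∈ js, 0 ≤ j ∧ j < (I : Int)) →
      js.foldl (innerF rev (I : Int)) (dp.set I acc)
        = dp.set I (js.foldl (fun acc j =>
            if PySem.List.pyGetD rev j 0 < PySem.List.pyGetD rev (I : Int) 0 then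
              max acc (PySem.List.pyGetD dp j 0 + 1) else acc) acc) := by
  intro js
  induction js with
  | nil => intro acc _; rfl
  | cons j t ih =>
      intro acc hmem
      simp only [List.foldl_cons]
      rcases hmem j List.mem_cons_self with ⟨hj0, hjI⟩
      have htail : ∀ j' ∈ t, 0 ≤ j' ∧ j' < (I : Int) :=
        fun j' hj' => hmem j' (List.mem_cons_of_mem _ hj')
      unfold innerF
      by_cases hc : PySem.List.pyGetD rev j 0 < PySem.List.pyGetD rev (I : Int) 0
      · rw [if_pos hc, if_pos hc]
        have e1 : PySem.List.pyGetD (dp.set I acc) (I : Int) 0 = acc := by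
          rw [← PySem.List.pySetD_natCast,
            PySem.List.pyGetD_pySetD_natCast dp I I acc 0 hI]
          simp
        have hj : j = ((j.toNat : Nat) : Int) := (Int.toNat_of_nonneg hj0).symm
        have e2 : PySem.List.pyGetD (dp.set I acc) j 0 = PySem.List.pyGetD dp j 0 := by
          rw [hj, ← PySem.List.pySetD_natCast,
            PySem.List.pyGetD_pySetD_natCast dp I j.toNat acc 0 hI]
          rw [if_neg (by omega)]
        rw [e1, e2, PySem.List.pySetD_natCast, List.set_set]
        exact ih _ htail
      · rw [if_neg hc, if_neg hc]
        exact ih _ htail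

theorem outer_inv (rev : List Int) (N : Nat) (hN1 : 1 ≤ N) (hNlen : N ≤ rev.length)
    (m : Nat) (hm : m ≤ N - 1) :
    (PySem.List.pyRange 1 (1 + (m : Int)) 1).foldl (outerF rev) (List.replicate (N + 1) (1 : Int))
      = (psOf ((rev.take N).take (m + 1))).map Prod.snd ++ List.replicate (N - m) (1 : Int) := by
  induction m with
  | zero =>
      rw [PySem.List.pyRange_one_eq_nil (by omega)]
      simp only [List.foldl_nil]
      have hlen : (rev.take N).length = N := by rw [List.length_take]; omega
      obtain ⟨a0, atl, ha⟩ : ∃ a0 atl, rev.take N = a0 :: atl := by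
        cases h : rev.take N with
        | nil => rw [h] at hlen; simp at hlen; omega
        | cons a tl => exact ⟨a, tl, rfl⟩
      rw [ha]
      have h1 : (a0 :: atl).take (0 + 1) = [a0] := by simp
      rw [h1]
      have h2 : psOf [a0] = [(a0, 1)] := by simp [psOf, psStep, newd]
      rw [h2]
      simp [List.replicate_succ]
  | succ m ih =>
      have hcast : (1 + ((m + 1 : Nat) : Int)) = (1 + (m : Int)) + 1 := by push_cast; ring
      rw [hcast, PySem.List.pyRange_one_succ_right (by omega), List.foldl_append,
        ih (by omega)]
      simp only [List.foldl_cons, List.foldl_nil]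
      have hlenaN : (rev.take N).length = N := by rw [List.length_take]; omega
      set aN := rev.take N with haN
      set ps := psOf (aN.take (m + 1)) with hps
      set snds := ps.map Prod.snd with hsnds
      have hpslen : ps.length = m + 1 := by
        have := congrArg List.length (psOf_fst (aN.take (m + 1)))
        simp only [List.length_map] at this
        rw [hps, this, List.length_take]
        omega
      have hsndslen : snds.length = m + 1 := by rw [hsnds, List.length_map, hpslen]
      have hdplen : (snds ++ List.replicate (N - m) (1 : Int)).length = N + 1 := by
        simp only [List.length_append, List.length_replicate, hsndslen]
        omega
      have hIcast : (1 + (m : Int)) = ((m + 1 : Nat) : Int) := by push_cast; ring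
      unfold outerF
      rw [hIcast]
      -- initial dp equals itself with index m+1 set to 1
      have hself : (snds ++ List.replicate (N - m) (1 : Int)).set (m + 1) 1
          = snds ++ List.replicate (N - m) (1 : Int) := by
        rw [List.set_append_right _ _ (by omega)]
        have hz : m + 1 - snds.length = 0 := by omega
        rw [hz]
        have h0 : 0 < N - m := by omega
        have := List.set_getElem_self (as := List.replicate (N - m) (1 : Int)) (i := 0)
          (by simpa using h0)
        simpa using this
      rw [← hself,
        inner_eval rev (m + 1) (snds ++ List.replicate (N - m) (1 : Int)) (by omega) _ 1
          (by intro j hj; rw [PySem.List.mem_pyRange_one] at hj; exact ⟨hj.1, hj.2⟩)]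
      set x := PySem.List.pyGetD rev ((m + 1 : Nat) : Int) 0 with hx
      -- replace the reads inside the fold by reads of the pair list ps
      have hbody : ∀ (acc : Int), ∀ j ∈ PySem.List.pyRange 0 ((m + 1 : Nat) : Int) 1,
          (if PySem.List.pyGetD rev j 0 < x then
              max acc (PySem.List.pyGetD (snds ++ List.replicate (N - m) (1 : Int)) j 0 + 1)
            else acc)
          = (fun acc (p : Int × Int) => if p.1 < x then max acc (p.2 + 1) else acc) acc
              (PySem.List.pyGetD ps j ((0 : Int), (0 : Int))) := by
        intro acc j hj
        rw [PySem.List.mem_pyRange_one] at hj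
        have hj0 : 0 ≤ j := hj.1
        have hjlt : j.toNat < m + 1 := by omega
        have hjrev : j.toNat < rev.length := by omega
        have hgp : PySem.List.pyGetD ps j ((0 : Int), (0 : Int)) = ps[j.toNat]'(by omega) := by
          rw [PySem.List.pyGetD_eq_getElem ps _ hj0 (by omega)]
        have hfst : (ps[j.toNat]'(by omega)).1 = rev[j.toNat]'hjrev := by
          have := congrArg (fun l => l[j.toNat]?) (psOf_fst (aN.take (m + 1)))
          simp only [List.getElem?_map] at this
          rw [← hps] at this
          have hg : (aN.take (m + 1))[j.toNat]? = some (rev[j.toNat]'hjrev) := by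
            rw [List.getElem?_take]
            rw [if_pos hjlt]
            rw [haN, List.getElem?_take, if_pos (by omega)]
            simp [List.getElem?_eq_getElem hjrev]
          rw [hg] at this
          have hg2 : ps[j.toNat]? = some (ps[j.toNat]'(by omega)) := List.getElem?_eq_getElem _
          rw [hg2] at this
          simp at this
          exact this
        have hrevj : PySem.List.pyGetD rev j 0 = rev[j.toNat]'hjrev := by
          rw [PySem.List.pyGetD_eq_getElem rev _ hj0 (by exact_mod_cast Int.lt_of_toNat_lt (by omega))]
        have hsndj : PySem.List.pyGetD (snds ++ List.replicate (N - m) (1 : Int)) j 0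
            = (ps[j.toNat]'(by omega)).2 := by
          rw [PySem.List.pyGetD_eq_getElem _ _ hj0 (by rw [hdplen]; omega)]
          rw [List.getElem_append_left (by omega)]
          simp only [hsnds, List.getElem_map]
        simp only [hgp, hrevj, hsndj, hfst]
      rw [PySem.List.foldl_congr_mem _ _ _ 1 hbody]
      have hlenps : ((m + 1 : Nat) : Int) = PySem.List.len ps := by
        rw [PySem.List.len_eq, hpslen]
      rw [hlenps, PySem.List.foldl_pyRange_zero_pyGetD ps ((0 : Int), (0 : Int))
        (fun acc (p : Int × Int) => if p.1 < x then max acc (p.2 + 1) else acc) 1]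
      rw [newd_eval]
      -- x is the (m+1)-st soldier
      have hm1N : m + 1 < N := by omega
      have hxval : x = aN[m + 1]'(by omega) := by
        rw [hx, PySem.List.pyGetD_eq_getElem rev _ (by omega) (by exact_mod_cast (by omega : ((m+1:Nat):Int) < (rev.length : Int)))]
        simp only [Int.toNat_natCast]
        simp [haN, List.getElem_take]
      -- right-hand side: extending the prefix by one element
      have htake : aN.take (m + 1 + 1) = aN.take (m + 1) ++ [aN[m + 1]'(by omega)] := by
        rw [List.take_succ]
        rw [List.getElem?_eq_getElem (by omega)]
        rfl
      rw [htake, psOf_append]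
      unfold psStep
      rw [List.map_append, ← hps, ← hsnds, ← hxval]
      -- left-hand side: setting index m+1 inside the replicate block
      rw [List.set_append_right _ _ (by omega)]
      have hz : m + 1 - snds.length = 0 := by omega
      rw [hz]
      have hNm : N - m = (N - (m + 1)) + 1 := by omega
      rw [hNm, List.replicate_succ, List.set_cons_zero]
      simp [List.append_assoc]

theorem foldl_psStep_prefix : ∀ (l : List Int) (init : List (Int × Int)),
    ∃ q, l.foldl psStep init = init ++ q := by
  intro l
  induction l with
  | nil => intro init; exact ⟨[], by simp⟩
  | cons y t ih =>
      intro init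
      rcases ih (psStep init y) with ⟨q, hq⟩
      refine ⟨(y, newd init y) :: q, ?_⟩
      rw [List.foldl_cons, hq]
      simp [psStep]

theorem psOf_cons (x : Int) (l : List Int) : ∃ q, psOf (x :: l) = (x, 1) :: q := by
  rcases foldl_psStep_prefix l (psStep [] x) with ⟨q, hq⟩
  refine ⟨q, ?_⟩
  have h1 : psStep [] x = [(x, 1)] := by simp [psStep, newd]
  rw [psOf, List.foldl_cons, hq, h1]
  rfl

theorem A_eval (n : Int) (soldiers : List Int) (h1 : 1 ≤ n) (h2 : n ≤ soldiers.length) :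
    solution n soldiers
      = n - ((psOf (soldiers.reverse.take n.toNat)).map Prod.snd).foldl max 0 := by
  have hrfl : solution n soldiers
      = n - ((PySem.List.max? ((PySem.List.pyRange 1 n 1).foldl (outerF soldiers.reverse)
          (List.replicate (n + 1).toNat (1 : Int))) (fun y => y)).getD 0) := rfl
  set N := n.toNat with hN
  have hN1 : 1 ≤ N := by omega
  have hNlen : N ≤ soldiers.reverse.length := by
    rw [List.length_reverse]; omega
  have hrange : PySem.List.pyRange 1 n 1 = PySem.List.pyRange 1 (1 + ((N - 1 : Nat) : Int)) 1 := by
    congr 1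
    push_cast
    omega
  have hrep : (n + 1).toNat = N + 1 := by omega
  rw [hrfl, hrange, hrep, outer_inv soldiers.reverse N hN1 hNlen (N - 1) (by omega)]
  have hs1 : (N - 1) + 1 = N := by omega
  have hs2 : N - (N - 1) = 1 := by omega
  rw [hs1, hs2]
  have hs3 : (soldiers.reverse.take N).take N = soldiers.reverse.take N := by
    simp [List.take_take]
  rw [hs3]
  -- decompose the soldier list to expose the head dp value 1
  have hlen : (soldiers.reverse.take N).length = N := by rw [List.length_take]; omega
  obtain ⟨a0, atl, ha⟩ : ∃ a0 atl, soldiers.reverse.take N = a0 :: atl := by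
    cases h : soldiers.reverse.take N with
    | nil => rw [h] at hlen; simp at hlen; omega
    | cons a tl => exact ⟨a, tl, rfl⟩
  rw [ha]
  rcases psOf_cons a0 atl with ⟨q, hq⟩
  rw [hq]
  simp only [List.map_cons, List.cons_append, PySem.List.max?_id_cons, Option.getD_some,
    List.foldl_cons, List.foldl_append, List.foldl_nil, List.replicate_one]
  have hge := PySem.List.le_foldl_max (q.map Prod.snd) (1 : Int)
  have hmax1 : max (0 : Int) 1 = 1 := by omega
  rw [hmax1]
  have : max ((q.map Prod.snd).foldl max 1) 1 = (q.map Prod.snd).foldl max 1 := by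
    have := hge.1
    omega
  rw [this]

-- ===== VERDICT (by name: the statement is the Claim_ definition above) =====
theorem solution_spec : Claim_unchanged_solution := by
  intro n soldiers _ hpre hd
  have hne : n ≠ 0 := fun h => hd h
  have h1 : 1 ≤ n := by rcases hpre with ⟨h0, _⟩; omega
  rw [A_eval n soldiers h1 hpre.2, B_eval n soldiers (by omega),
    length_eq_maxd _ _ (inv_psOf (soldiers.reverse.take n.toNat))]

theorem solution_changed : Claim_changed_solution := by
  unfold Claim_changed_solution; decide

theorem solution_tight : Claim_exact_solution := by
  intro n soldiers _ _ hd
  have h0 : n = 0 := hd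
  subst h0
  rw [B_eval 0 soldiers le_rfl]
  simp [solution, PySem.List.pyRange_one_eq_nil, PySem.List.max?_id_cons]
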